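-- pv_equiv track=rewrite | github.com/jinan02/scilpy | scripts/scil_search_keywords.py | _test_adjacent_keywords
-- ===== SOURCE A (Python) =====
-- def _test_adjacent_keywords(keywords, text):
--     """Test if keywords appear next to each other in the specified order in the text.
--
--     Parameters
--     ----------
--     keywords : List of str
--         Keywords to test for.
--     text : str
--         String that should contain the keywords.
--
--     Returns
--     -------
--     True if the keywords appear next to each other in the specified order.
--     """
--
--     position = 0
--     for key in keywords:
--         position = text.lower().find(key, position)
--         if position == -1:
--             return False
--         position += len(key)
--     return True
-- ===== SOURCE B (Python) =====
-- def _test_adjacent_keywords(keywords, text):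
--     """Single left-to-right scan over the lowered text: walk the text one
--     position at a time with the list of still-unmatched keywords; whenever the
--     next keyword starts at the current position, consume it and jump past it,
--     otherwise advance by one character.  Same greedy earliest placement as a
--     per-keyword find() loop, computed by a single scan."""
--     t = text.lower()
--     rest = list(keywords)
--     i = 0
--     while i <= len(t):
--         if not rest:
--             return True
--         k = rest[0]
--         if t.startswith(k, i):
--             rest = rest[1:]
--             i += len(k)
--         else:
--             i += 1
--     return not rest
-- ===== Notes on version B (the rewrite author's own statement) =====
-- stated objective: alternative
-- what changed: Replaced A's per-keyword find() loop (restart a substring search for each keyword) by a single left-to-right scan over the text that carries the list of still-unmatched keywords, consuming a keyword whenever it starts at the current position and otherwise stepping one character; both compute the same greedy earliest ordered placement.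
import Mathlib
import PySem

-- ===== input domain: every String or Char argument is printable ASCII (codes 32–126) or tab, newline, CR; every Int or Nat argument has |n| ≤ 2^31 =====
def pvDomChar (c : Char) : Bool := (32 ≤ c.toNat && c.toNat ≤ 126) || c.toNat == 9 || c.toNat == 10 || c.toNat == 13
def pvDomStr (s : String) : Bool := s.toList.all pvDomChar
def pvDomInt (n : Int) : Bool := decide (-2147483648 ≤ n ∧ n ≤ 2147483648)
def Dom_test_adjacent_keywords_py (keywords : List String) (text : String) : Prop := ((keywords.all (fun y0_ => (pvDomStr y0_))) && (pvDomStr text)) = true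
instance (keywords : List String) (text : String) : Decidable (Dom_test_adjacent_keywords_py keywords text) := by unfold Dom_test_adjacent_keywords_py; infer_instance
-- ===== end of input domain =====

-- B replaces A's per-keyword find() loop by a single left-to-right scan of the text
-- carrying the list of still-unmatched keywords (objective: alternative).

-- ===== PORT A =====
-- A's loop: position starts at 0; for each key, position = text.lower().find(key, position);
-- return False on -1, else advance position by len(key).
def pvALoop (text : String) (keys : List String) (position : Int) : Bool :=
  match keys with
  | [] => true
  | key :: rest =>
    let position := PySem.Chars.findFrom (PySem.Chars.lower text.toList) key.toList position none
    if position == -1 then false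
    else pvALoop text rest (position + PySem.Str.len key)

def test_adjacent_keywords_py (keywords : List String) (text : String) : Bool :=
  pvALoop text keywords 0

-- ===== PORT B =====
-- B's while-loop: i walks the lowered text one position at a time; rest holds the
-- still-unmatched keywords; t.startswith(k, i) with 0 ≤ i ≤ len(t) is exactly
-- 'k.toList is a prefix of t.drop i' (in-range start, so List.isPrefixOf is exact).
def pvBScan (t : List Char) (rest : List String) (i : Nat) : Bool :=
  if _h : i ≤ t.length then
    match rest with
    | [] => true
    | k :: ks =>
      if k.toList.isPrefixOf (t.drop i) then pvBScan t ks (i + k.toList.length)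
      else pvBScan t (k :: ks) (i + 1)
  else rest.isEmpty
termination_by t.length + 1 - i + rest.length
decreasing_by all_goals simp_wf; omega

def test_adjacent_keywords_py_alt (keywords : List String) (text : String) : Bool :=
  let t := PySem.Chars.lower text.toList
  pvBScan t keywords 0

-- ===== PRECONDITION & SPEC =====
def Spec_test_adjacent_keywords_py (keywords : List String) (text : String) (out : Bool) : Prop := out = test_adjacent_keywords_py_alt keywords text
instance (keywords : List String) (text : String) (out : Bool) : Decidable (Spec_test_adjacent_keywords_py keywords text out) := by unfold Spec_test_adjacent_keywords_py; infer_instance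

-- ===== CLAIM (what is proved, stated in full; the proofs are below) =====
def Claim_equal_test_adjacent_keywords_py : Prop := ∀ (keywords : List String) (text : String), Dom_test_adjacent_keywords_py keywords text → Spec_test_adjacent_keywords_py keywords text (test_adjacent_keywords_py keywords text)

-- ===== LEMMAS AND PROOFS =====

-- find is characterised by "prefix here and nowhere earlier"
theorem pvFind_eq_of (s sub : List Char) (f : Nat) (hf : sub <+: s.drop f)
    (hmin : ∀ j < f, ¬ sub <+: s.drop j) : PySem.Chars.find s sub = (f : Int) := by
  have hin : PySem.Chars.isIn sub s = true :=
    (PySem.Chars.exists_prefix_drop_iff_isIn _ _).mp ⟨f, hf⟩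
  have h0 : 0 ≤ PySem.Chars.find s sub :=
    (PySem.Chars.find_nonneg_iff _ _).mpr ((PySem.Chars.isIn_iff_infix _ _).mp hin)
  obtain ⟨hpre, hmin'⟩ := PySem.Chars.find_spec (s := s) (sub := sub) h0
  set F := (PySem.Chars.find s sub).toNat with hF
  rcases Nat.lt_trichotomy F f with h | h | h
  · exact absurd hpre (hmin F h)
  · rw [← h, hF, Int.toNat_of_nonneg h0]
  · exact absurd hf (hmin' f h)

-- shifting the start of the search by one
theorem pvFind_shift (t sub : List Char) (i f : Nat)
    (hf : PySem.Chars.find (t.drop i) sub = ((f + 1 : Nat) : Int)) :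
    PySem.Chars.find (t.drop (i + 1)) sub = (f : Int) := by
  have h0 : 0 ≤ PySem.Chars.find (t.drop i) sub := by rw [hf]; positivity
  obtain ⟨hpre, hmin⟩ := PySem.Chars.find_spec (s := t.drop i) (sub := sub) h0
  rw [hf, Int.toNat_natCast] at hpre hmin
  apply pvFind_eq_of
  · rw [List.drop_drop]
    have : i + 1 + f = i + (f + 1) := by omega
    rw [this]
    rw [List.drop_drop] at hpre
    exact hpre
  · intro j hj
    rw [List.drop_drop]
    have : i + 1 + j = i + (j + 1) := by omega
    rw [this, ← List.drop_drop]
    exact hmin (j + 1) (by omega)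

-- if the keyword occurs nowhere at or after i, the scan runs off the end and fails
theorem pvBScan_fail (t : List Char) (k : String) (ks : List String) :
    ∀ n i, t.length - i = n → i ≤ t.length →
    PySem.Chars.find (t.drop i) k.toList = -1 → pvBScan t (k :: ks) i = false := by
  intro n
  induction n with
  | zero =>
    intro i hn hi hf
    have hie : i = t.length := by omega
    have hnp : ¬ k.toList <+: t.drop i := by
      intro hp
      have : PySem.Chars.isIn k.toList (t.drop i) = true :=
        (PySem.Chars.exists_prefix_drop_iff_isIn _ _).mp ⟨0, by simpa using hp⟩
      have := (PySem.Chars.find_ne_neg_one_iff _ _).mpr ((PySem.Chars.isIn_iff_infix _ _).mp this)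
      exact this hf
    rw [pvBScan, dif_pos hi]
    rw [if_neg (fun hc => hnp (List.isPrefixOf_iff_prefix.mp hc))]
    rw [pvBScan, dif_neg (by omega)]
    simp
  | succ m ih =>
    intro i hn hi hf
    have hninf : ¬ k.toList <:+: t.drop i := (PySem.Chars.find_eq_neg_one_iff _ _).mp hf
    have hnp : ¬ k.toList <+: t.drop i := fun hp => hninf hp.isInfix
    rw [pvBScan, dif_pos hi]
    rw [if_neg (fun hc => hnp (List.isPrefixOf_iff_prefix.mp hc))]
    apply ih (i + 1) (by omega) (by omega)
    rw [PySem.Chars.find_eq_neg_one_iff]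
    intro hinf
    apply hninf
    have : t.drop (i + 1) <:+ t.drop i := by
      rw [show i + 1 = i + 1 from rfl, ← List.drop_drop]
      exact List.drop_suffix _ _
    exact hinf.trans this.isInfix

-- if the first occurrence at/after i is at offset f, the scan walks up to it,
-- consumes the keyword and continues at i + f + len k
theorem pvBScan_step (t : List Char) (k : String) (ks : List String) :
    ∀ (f : Nat) (i : Nat), i ≤ t.length →
    PySem.Chars.find (t.drop i) k.toList = (f : Int) →
    pvBScan t (k :: ks) i = pvBScan t ks (i + f + k.toList.length) := by
  intro f
  induction f with
  | zero =>
    intro i hi hf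
    obtain ⟨hpre, -⟩ := PySem.Chars.find_spec (s := t.drop i) (sub := k.toList) (by rw [hf]; exact le_refl _)
    rw [hf] at hpre
    simp only [Int.toNat_natCast, List.drop_zero] at hpre
    rw [pvBScan, dif_pos hi, if_pos (List.isPrefixOf_iff_prefix.mpr hpre)]
    norm_num
  | succ m ih =>
    intro i hi hf
    have hf' : PySem.Chars.find (t.drop i) k.toList = ((m + 1 : Nat) : Int) := by exact_mod_cast hf
    obtain ⟨hpre, hmin⟩ := PySem.Chars.find_spec (s := t.drop i) (sub := k.toList) (by rw [hf']; positivity)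
    rw [hf', Int.toNat_natCast] at hpre hmin
    have hnp : ¬ k.toList <+: t.drop i := by
      have := hmin 0 (by omega)
      simpa using this
    have hfle : m + 1 ≤ t.length - i := by
      have h1 := PySem.Chars.find_le_length (t.drop i) k.toList
      rw [hf'] at h1
      simp only [List.length_drop] at h1
      exact_mod_cast h1
    have hlen : m + 1 + k.toList.length ≤ (t.drop i).length := by
      have := hpre.length_le
      simp only [List.length_drop] at this ⊢
      omega
    simp only [List.length_drop] at hlen
    rw [pvBScan, dif_pos hi]
    rw [if_neg (fun hc => hnp (List.isPrefixOf_iff_prefix.mp hc))]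
    rw [ih (i + 1) (by omega) (pvFind_shift t k.toList i m hf')]
    congr 1
    omega

-- the two loops coincide at every in-range position
theorem pvLoop_eq_scan (text : String) (keys : List String) :
    ∀ (p : Nat), p ≤ (PySem.Chars.lower text.toList).length →
    pvALoop text keys (p : Int) = pvBScan (PySem.Chars.lower text.toList) keys p := by
  induction keys with
  | nil =>
    intro p hp
    rw [pvALoop.eq_def, pvBScan, dif_pos hp]
  | cons key rest ih =>
    intro p hp
    set t := PySem.Chars.lower text.toList with ht
    simp only [pvALoop]
    rw [PySem.Chars.findFrom_natCast t key.toList p hp]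
    by_cases hf : PySem.Chars.find (t.drop p) key.toList = -1
    · rw [if_pos hf]
      simp only [beq_self_eq_true, if_true]
      exact (pvBScan_fail t key rest (t.length - p) p rfl hp hf).symm
    · rw [if_neg hf]
      have h0 : 0 ≤ PySem.Chars.find (t.drop p) key.toList :=
        (PySem.Chars.find_nonneg_iff _ _).mpr ((PySem.Chars.find_ne_neg_one_iff _ _).mp hf)
      obtain ⟨f, hfI⟩ : ∃ f : Nat, PySem.Chars.find (t.drop p) key.toList = (f : Int) :=
        ⟨_, (Int.toNat_of_nonneg h0).symm⟩
      obtain ⟨hpre, -⟩ := PySem.Chars.find_spec (s := t.drop p) (sub := key.toList) h0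
      rw [hfI, Int.toNat_natCast] at hpre
      have hfle : f ≤ t.length - p := by
        have h1 := PySem.Chars.find_le_length (t.drop p) key.toList
        rw [hfI] at h1
        simp only [List.length_drop] at h1
        exact_mod_cast h1
      have hlen : f + key.toList.length ≤ t.length - p := by
        have := hpre.length_le
        simp only [List.length_drop] at this
        omega
      have hlenk : PySem.Str.len key = (key.toList.length : Int) := by
        simp [PySem.Str.len_eq]
      rw [hfI, hlenk]
      have c1 : (((p : Int) + (f : Int)) == (-1 : Int)) = false := by
        rw [beq_eq_false_iff_ne]; omega
      rw [c1]
      simp only [Bool.false_eq_true, if_false]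
      have harg : (p : Int) + (f : Int) + (key.toList.length : Int)
          = ((p + f + key.toList.length : Nat) : Int) := by push_cast; ring
      rw [harg, ih (p + f + key.toList.length) (by omega)]
      exact (pvBScan_step t key rest f p hp hfI).symm

-- ===== VERDICT (by name: the statement is the Claim_ definition above) =====
theorem test_adjacent_keywords_py_spec : Claim_equal_test_adjacent_keywords_py := by
  intro keywords text _
  unfold Spec_test_adjacent_keywords_py test_adjacent_keywords_py test_adjacent_keywords_py_alt
  rw [show (0 : Int) = ((0 : Nat) : Int) from rfl]
  exact pvLoop_eq_scan text keywords 0 (Nat.zero_le _)
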